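-- pv_equiv track=rewrite | github.com/minseunghwang/Algorithm | TEST/20201115 마이다스아잍/3.py | solution
-- ===== SOURCE A (Python) =====
-- def solution(cookies,k):
--     answer = []
--     queue = []
--     for i in range(len(cookies)):
--         queue.append([[cookies[i]], cookies[i+1:]])
--
--     while queue:
--         n = queue.pop()
--
--         if n[1] == []:
--             answer.append(n[0])
--             continue
--
--         e = n[1].pop(0)
--         if e > n[0][-1]:
--             queue.append([n[0][:] + [e], n[1][:]])
--         queue.append([n[0][:], n[1][:]])
--
--     max_ = max(len(x) for x in answer)
--     maxcookies = sorted(list(x for x in answer if len(x) == max_))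
--     return maxcookies[k-1]
-- ===== SOURCE B (Python) =====
-- def solution(cookies, k):
--     # all strictly increasing subsequences (as value lists, one per index set),
--     # built in one right-to-left fold -- no worklist, no prefix/rest state
--     subs = [[]]
--     for e in reversed(cookies):
--         subs = [[e] + s for s in subs if not s or e < s[0]] + subs
--     cand = [s for s in subs if s]
--     m = max(len(s) for s in cand)
--     best = sorted(s for s in cand if len(s) == m)
--     return best[k - 1]
-- ===== Notes on version B (the rewrite author's own statement) =====
-- stated objective: alternative
-- what changed: A's explicit worklist DFS over [prefix, remaining] states (one stack item per visited state, popped and copied at every step) is replaced by a single right-to-left fold that builds the list of all strictly increasing subsequences directly, followed by the same max-length filter, sort and k-1 indexing.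
import Mathlib
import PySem

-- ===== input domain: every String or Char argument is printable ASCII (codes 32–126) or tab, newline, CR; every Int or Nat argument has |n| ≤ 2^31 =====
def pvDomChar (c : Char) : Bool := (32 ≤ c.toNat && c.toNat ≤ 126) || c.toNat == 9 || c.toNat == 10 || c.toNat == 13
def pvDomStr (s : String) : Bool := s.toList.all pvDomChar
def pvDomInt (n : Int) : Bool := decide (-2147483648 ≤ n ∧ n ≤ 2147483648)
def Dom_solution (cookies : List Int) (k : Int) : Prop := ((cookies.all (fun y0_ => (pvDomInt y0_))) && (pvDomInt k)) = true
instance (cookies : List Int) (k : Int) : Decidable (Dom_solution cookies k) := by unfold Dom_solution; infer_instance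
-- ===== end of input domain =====

-- B replaces A's explicit worklist DFS over (prefix, remaining) states by a single right-to-left
-- fold that builds every strictly increasing subsequence directly (objective: alternative; A's
-- .pop(0) mutates a popped-off local list only, so callers observe no argument mutation in
-- either program).

-- ===== PORT A =====
-- helper lemmas the port's termination proof cites
theorem pvPop_eq_some {α : Type} {q q1 : List α} {n : α}
    (h : PySem.List.pop? q = some (n, q1)) : q = q1 ++ [n] := by
  induction q using List.reverseRecOn with
  | nil => simp [PySem.List.pop?] at h
  | append_singleton xs x _ =>
    rw [PySem.List.pop?_last] at h
    cases h; rfl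

def pvMeasure (q : List (List Int × List Int)) : Nat :=
  (q.map (fun n => 3 ^ n.2.length)).sum

theorem pvMeasure_append (a b : List (List Int × List Int)) :
    pvMeasure (a ++ b) = pvMeasure a + pvMeasure b := by
  simp [pvMeasure]

-- the while-loop of A: queue of [prefix, rest] pairs, popped from the end
-- (n[0][-1] is ported with default 0: every prefix A ever enqueues is nonempty)
def solutionLoop (q : List (List Int × List Int)) (ans : List (List Int)) : List (List Int) :=
  match h : PySem.List.pop? q with
  | none => ans
  | some (n, q1) =>
    match n with
    | (p, []) => solutionLoop q1 (ans ++ [p])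
    | (p, e :: rest) =>
      solutionLoop
        ((if PySem.List.pyGetD p (-1) 0 < e then q1 ++ [(p ++ [e], rest)] else q1) ++ [(p, rest)])
        ans
termination_by pvMeasure q
decreasing_by
  · rw [pvPop_eq_some h, pvMeasure_append]
    simp [pvMeasure]
  · rw [pvPop_eq_some h, pvMeasure_append, pvMeasure_append]
    have h3 : 0 < 3 ^ rest.length := by positivity
    split <;> simp [pvMeasure, pow_succ] <;> omega

def solution (cookies : List Int) (k : Int) : List Int :=
  let queue := (PySem.List.pyRange 0 (PySem.List.len cookies) 1).foldl
      (fun q i => q ++ [([PySem.List.pyGetD cookies i 0], PySem.List.slice cookies (some (i + 1)) none)]) []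
  let answer := solutionLoop queue []
  let max_ := (PySem.List.max? (answer.map (fun x => PySem.List.len x)) (fun y => y)).getD 0
  let maxcookies := PySem.List.sorted (answer.filter (fun x => PySem.List.len x == max_)) (fun x => x) false
  (PySem.List.pyGet? maxcookies (k - 1)).getD []

-- ===== PORT B =====
def solution_alt (cookies : List Int) (k : Int) : List Int :=
  let subs := cookies.reverse.foldl
      (fun subs e =>
        (subs.filter (fun s => match s with | [] => true | x :: _ => decide (e < x))).map
          (fun s => e :: s) ++ subs) [[]]
  let cand := subs.filter (fun s => !s.isEmpty)
  let m := (PySem.List.max? (cand.map (fun s => PySem.List.len s)) (fun y => y)).getD 0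
  let best := PySem.List.sorted (cand.filter (fun s => PySem.List.len s == m)) (fun x => x) false
  (PySem.List.pyGet? best (k - 1)).getD []

-- ===== PRECONDITION & SPEC =====
-- an independent O(n^2) DP (used by neither port): length and count of the longest strictly
-- increasing subsequence starting at each position, scanned right to left
def lisStats (c : List Int) : List (Nat × Nat × Int) :=
  c.foldr (fun v acc =>
    let b := acc.foldl (fun m t =>
      if v < t.2.2 then
        (if m.1 < t.1 then (t.1, t.2.1) else if t.1 = m.1 then (m.1, m.2 + t.2.1) else m)
      else m) ((0 : Nat), (1 : Nat))
    (b.1 + 1, b.2, v) :: acc) []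

def lisCount (c : List Int) : Nat :=
  let st := lisStats c
  let M := st.foldl (fun m t => max m t.1) 0
  (st.filter (fun t => t.1 == M)).foldr (fun t s => s + t.2.1) 0

-- Pre_ excludes exactly the inputs where A raises: empty cookies (ValueError from max on an empty
-- sequence) and a k for which index k-1 is out of range (in Python's negative-index sense) of the
-- list of longest strictly increasing subsequences; lisCount is the number of those subsequences.
def Pre_solution (cookies : List Int) (k : Int) : Prop :=
  cookies ≠ [] ∧ 1 - (lisCount cookies : Int) ≤ k ∧ k ≤ (lisCount cookies : Int)
instance (cookies : List Int) (k : Int) : Decidable (Pre_solution cookies k) := by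
  unfold Pre_solution; infer_instance

def pvWitness_solution : List Int × Int := ([1, 2], 1)

def Spec_solution (cookies : List Int) (k : Int) (out : List Int) : Prop := out = solution_alt cookies k
instance (cookies : List Int) (k : Int) (out : List Int) : Decidable (Spec_solution cookies k out) := by unfold Spec_solution; infer_instance

-- ===== CLAIM (what is proved, stated in full; the proofs are below) =====
def Claim_equal_solution : Prop := ∀ (cookies : List Int) (k : Int), Dom_solution cookies k → Pre_solution cookies k → Spec_solution cookies k (solution cookies k)

-- ===== LEMMAS AND PROOFS =====

-- what A's loop produces for a single queue item (prefix p, remaining r)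
def gA : List Int → List Int → List (List Int)
  | p, [] => [p]
  | p, e :: r => (if PySem.List.pyGetD p (-1) 0 < e then gA (p ++ [e]) r else []) ++ gA p r
termination_by _ r => r.length

-- all (possibly empty) strictly increasing subsequences of r whose head exceeds v
def EA : Int → List Int → List (List Int)
  | _, [] => [[]]
  | v, e :: r => (if v < e then (EA e r).map (fun s => e :: s) else []) ++ EA v r

-- all (possibly empty) strictly increasing subsequences: B's fold in recursive form
def FB : List Int → List (List Int)
  | [] => [[]]
  | e :: r =>
      ((FB r).filter (fun s => match s with | [] => true | x :: _ => decide (e < x))).map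
        (fun s => e :: s) ++ FB r

def queueOf (c : List Int) : List (List Int × List Int) :=
  (List.range c.length).map (fun i => ([c.getD i 0], c.drop (i + 1)))

theorem pvPop_eq_none {α : Type} {q : List α}
    (h : PySem.List.pop? q = none) : q = [] := by
  induction q using List.reverseRecOn with
  | nil => rfl
  | append_singleton xs x _ => rw [PySem.List.pop?_last] at h; cases h

theorem loop_perm (q : List (List Int × List Int)) (ans : List (List Int)) :
    (solutionLoop q ans).Perm (ans ++ q.flatMap (fun n => gA n.1 n.2)) := by
  induction q, ans using solutionLoop.induct with
  | case1 q ans h =>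
    rw [pvPop_eq_none h]
    rw [solutionLoop.eq_def]
    split
    · simp
    · rename_i heq
      simp [PySem.List.pop?, PySem.List.pyIdx?] at heq
  | case2 q ans q1 p h hn ih =>
    rw [pvPop_eq_some h]
    rw [solutionLoop.eq_def]
    split
    · rename_i heq
      rw [PySem.List.pop?_last] at heq
      cases heq
    · rename_i a b heq
      rw [PySem.List.pop?_last] at heq
      simp only [Option.some.injEq, Prod.mk.injEq] at heq
      obtain ⟨h1, h2⟩ := heq
      subst h1; subst h2
      refine ih.trans ?_
      simp only [List.flatMap_append, List.flatMap_cons, gA, List.flatMap_nil,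
        List.append_nil, List.append_assoc]
      exact List.Perm.append_left ans (List.perm_append_comm)
  | case3 q ans q1 p e rest h hn ih =>
    rw [pvPop_eq_some h]
    rw [solutionLoop.eq_def]
    split
    · rename_i heq
      rw [PySem.List.pop?_last] at heq
      cases heq
    · rename_i a b heq
      rw [PySem.List.pop?_last] at heq
      simp only [Option.some.injEq, Prod.mk.injEq] at heq
      obtain ⟨h1, h2⟩ := heq
      subst h1; subst h2
      refine ih.trans ?_
      by_cases hc : PySem.List.pyGetD p (-1) 0 < e <;>
        simp [hc, List.flatMap_append, gA, List.append_assoc]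

theorem gA_last (r : List Int) (p : List Int) (x : Int) :
    gA (p ++ [x]) r = (EA x r).map (fun s => (p ++ [x]) ++ s) := by
  induction r generalizing p x with
  | nil => simp [gA, EA]
  | cons e r ih =>
    rw [gA, EA, PySem.List.pyGetD_neg_one_append_singleton]
    by_cases hx : x < e
    · have h1 := ih (p ++ [x]) e
      simp only [List.append_assoc, List.cons_append, List.nil_append] at h1 ⊢
      simp [hx, h1, ih p x, List.map_map, Function.comp_def]
    · simp [hx, ih p x]

theorem EA_filter (r : List Int) (v : Int) :
    EA v r = (FB r).filter (fun s => match s with | [] => true | x :: _ => decide (v < x)) := by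
  induction r generalizing v with
  | nil => simp [EA, FB]
  | cons e r ih =>
    rw [EA, FB, List.filter_append, List.filter_map]
    have hc : ((fun s => match s with | [] => true | x :: _ => decide (v < x)) ∘ (fun s => e :: s))
        = fun _ => decide (v < e) := by funext s; rfl
    rw [hc, ← ih v, ← ih e]
    by_cases hv : v < e <;> simp [hv]

theorem queueOf_cons (e : Int) (r : List Int) :
    queueOf (e :: r) = ([e], r) :: queueOf r := by
  unfold queueOf
  rw [List.length_cons, List.range_succ_eq_map]
  simp [List.map_map, Function.comp_def]

theorem main_enum (c : List Int) :
    (queueOf c).flatMap (fun n => gA n.1 n.2) = (FB c).filter (fun s => !s.isEmpty) := by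
  induction c with
  | nil => simp [queueOf, FB]
  | cons e r ih =>
    rw [queueOf_cons, List.flatMap_cons, ih, FB, List.filter_append, List.filter_map]
    have hg : gA ([e] : List Int) r = (EA e r).map (fun s => e :: s) := by
      have := gA_last r [] e; simpa using this
    have hc : ((fun s => !List.isEmpty s) ∘ (fun s => e :: s)) = fun _ => true := by
      funext s; rfl
    rw [hg, hc, List.filter_true, EA_filter]

theorem max?_perm {l l' : List Int} (h : l.Perm l') :
    PySem.List.max? l (fun y => y) = PySem.List.max? l' (fun y => y) := by
  cases hm : PySem.List.max? l (fun y => y) with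
  | none =>
    rw [PySem.List.max?_eq_none_iff] at hm
    subst hm
    rw [List.nil_perm] at h
    subst h
    rfl
  | some m =>
    cases hm' : PySem.List.max? l' (fun y => y) with
    | none =>
      rw [PySem.List.max?_eq_none_iff] at hm'
      subst hm'
      rw [List.perm_nil] at h
      subst h
      simp [PySem.List.max?] at hm
    | some m' =>
      have h1 := PySem.List.max?_mem hm
      have h2 := PySem.List.max?_mem hm'
      have h3 := PySem.List.max?_isMax hm m' (h.symm.subset h2)
      have h4 := PySem.List.max?_isMax hm' m (h.subset h1)
      simp only [Option.some.injEq]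
      omega

theorem sorted_inst (l : List (List Int)) :
    @PySem.List.sorted (List Int) (List Int) List.instLT (fun a b => a.decidableLT b) l (fun x => x) false
    = @PySem.List.sorted (List Int) (List Int) List.instLinearOrder.toLT
        (@LinearOrder.toDecidableLT _ List.instLinearOrder) l (fun x => x) false := by
  have hi : (fun (a b : List Int) => a.decidableLT b)
      = (@LinearOrder.toDecidableLT (List Int) List.instLinearOrder) := by
    funext a b; exact Subsingleton.elim _ _
  exact congrFun (congrFun (congrFun (congrArg
    (@PySem.List.sorted (List Int) (List Int) List.instLT) hi) l) (fun x => x)) false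

theorem sorted_perm_eq {l l' : List (List Int)} (h : l.Perm l') :
    @PySem.List.sorted (List Int) (List Int) List.instLT (fun a b => a.decidableLT b) l (fun x => x) false
    = @PySem.List.sorted (List Int) (List Int) List.instLT (fun a b => a.decidableLT b) l' (fun x => x) false := by
  rw [sorted_inst, sorted_inst]
  exact PySem.List.sorted_eq_sorted_of_perm _ _ _ (fun a b hab => hab) h

theorem foldB_eq (c : List Int) :
    c.reverse.foldl
      (fun subs e =>
        (subs.filter (fun s => match s with | [] => true | x :: _ => decide (e < x))).map
          (fun s => e :: s) ++ subs) [[]] = FB c := by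
  rw [List.foldl_reverse]
  induction c with
  | nil => rfl
  | cons e r ih => rw [List.foldr_cons, ih, FB]

theorem solution_eq_alt (c : List Int) (k : Int) : solution c k = solution_alt c k := by
  have hq : (PySem.List.pyRange 0 (PySem.List.len c) 1).foldl
      (fun q i => q ++ [([PySem.List.pyGetD c i 0], PySem.List.slice c (some (i + 1)) none)]) []
      = queueOf c := by
    rw [PySem.List.foldl_append_singleton_eq_map]
    simp only [List.nil_append, PySem.List.len_eq]
    rw [PySem.List.pyRange_zero_nat, List.map_map]
    unfold queueOf
    refine List.map_congr_left (fun j _ => ?_)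
    have hs : PySem.List.slice c (some ((j : Int) + 1)) none = c.drop (j + 1) := by
      have := PySem.List.slice_from_natCast c (j + 1)
      push_cast at this
      exact this
    simp [hs]
  have hans : (solutionLoop (queueOf c) []).Perm ((FB c).filter (fun s => !s.isEmpty)) := by
    have := loop_perm (queueOf c) []
    rwa [List.nil_append, main_enum] at this
  simp only [solution, solution_alt, hq, foldB_eq]
  rw [max?_perm (hans.map (fun x => PySem.List.len x))]
  refine congrArg (fun l => (PySem.List.pyGet? l (k - 1)).getD ([] : List Int)) ?_
  exact sorted_perm_eq (hans.filter _)

-- ===== VERDICT (by name: the statement is the Claim_ definition above) =====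
theorem solution_spec : Claim_equal_solution := by
  intro cookies k _ _
  unfold Spec_solution
  exact solution_eq_alt cookies k
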